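-- pv_equiv track=rewrite | github.com/AI-Gio/StructuredProgramming | Mastermind/Mastermind.py | PCFeedback
-- ===== SOURCE A (Python) =====
-- def PCFeedback(SecretCode, Guess): # Deze code geeft een feedback terug met input de secret code en een gok
--     BlackPins = 0
--     WhitePins = 0
--     SecretCodeTemp = []
--     GuessTemp = []
-- #Black pins
--     for i in range(0,4):
--         if Guess[i] == SecretCode[i]:
--             BlackPins += 1
--         else:
--             SecretCodeTemp.append(SecretCode[i])
--             GuessTemp.append(Guess[i])
-- #White pins
--     for i in GuessTemp:
--         for j in SecretCodeTemp:
--             if i == j: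
--                 SecretCodeTemp.remove(j)
--                 WhitePins += 1
--                 break
-- #Data displayed
--     return BlackPins, WhitePins
-- ===== SOURCE B (Python) =====
-- def PCFeedback(SecretCode, Guess):
--     BlackPins = 0
--     SecretLeft = []
--     GuessLeft = []
--     for i in range(4):
--         if Guess[i] == SecretCode[i]:
--             BlackPins += 1
--         else:
--             SecretLeft.append(SecretCode[i])
--             GuessLeft.append(Guess[i])
--     # White pins by counting: no quadratic match-and-remove, just multiset intersection size
--     secret_counts = {}
--     for c in SecretLeft:
--         secret_counts[c] = secret_counts.get(c, 0) + 1
--     guess_counts = {}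
--     for c in GuessLeft:
--         guess_counts[c] = guess_counts.get(c, 0) + 1
--     WhitePins = sum(min(n, secret_counts.get(c, 0)) for c, n in guess_counts.items())
--     return BlackPins, WhitePins
-- ===== Notes on version B (the rewrite author's own statement) =====
-- stated objective: alternative
-- what changed: White pins are computed by building occurrence counters of the two leftover lists and summing min(guess_count, secret_count) per colour, replacing A's greedy nested match-and-remove scan over the shrinking secret list.
import Mathlib
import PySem

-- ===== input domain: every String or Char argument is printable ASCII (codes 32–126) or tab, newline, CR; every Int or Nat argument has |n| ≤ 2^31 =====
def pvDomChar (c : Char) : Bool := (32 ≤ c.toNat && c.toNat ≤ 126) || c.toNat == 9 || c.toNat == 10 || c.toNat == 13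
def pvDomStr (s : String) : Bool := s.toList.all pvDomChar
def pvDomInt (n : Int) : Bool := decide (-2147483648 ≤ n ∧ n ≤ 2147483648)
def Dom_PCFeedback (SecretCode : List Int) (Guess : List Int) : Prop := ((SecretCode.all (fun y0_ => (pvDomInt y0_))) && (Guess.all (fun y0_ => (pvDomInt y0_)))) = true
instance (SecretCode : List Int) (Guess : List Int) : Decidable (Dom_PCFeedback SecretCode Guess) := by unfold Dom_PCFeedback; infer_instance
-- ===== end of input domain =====

-- B replaces A's greedy nested match-and-remove white-pin scan by dict counters and a min-sum (alternative decomposition, same result).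
-- A also mutates nothing observable; both ports are about the return value.

-- ===== PORT A =====
-- inner 'for j in SecretCodeTemp: if i == j: SecretCodeTemp.remove(j); WhitePins += 1; break'
-- (remove(j) with j == i deletes exactly the element found, then the loop breaks, so the
--  scan-and-delete below is the net effect of Python's mutate-during-iteration, step for step)
def pyInnerRemove (i : Int) : List Int → List Int × Int
  | [] => ([], 0)
  | j :: rest =>
    if i == j then (rest, 1)
    else
      let q := pyInnerRemove i rest
      (j :: q.1, q.2)

def PCFeedback (SecretCode : List Int) (Guess : List Int) : Int × Int :=
  let st := (PySem.List.pyRange 0 4 1).foldl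
    (fun (st : Int × List Int × List Int) i =>
      if PySem.List.pyGetD Guess i 0 == PySem.List.pyGetD SecretCode i 0 then
        (st.1 + 1, st.2.1, st.2.2)
      else
        (st.1, st.2.1 ++ [PySem.List.pyGetD SecretCode i 0], st.2.2 ++ [PySem.List.pyGetD Guess i 0]))
    (0, [], [])
  let fin := st.2.2.foldl
    (fun (p : List Int × Int) i =>
      let q := pyInnerRemove i p.1
      (q.1, p.2 + q.2))
    (st.2.1, 0)
  (st.1, fin.2)

-- ===== PORT B =====
def PCFeedback_alt (SecretCode : List Int) (Guess : List Int) : Int × Int :=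
  let st := (PySem.List.pyRange 0 4 1).foldl
    (fun (st : Int × List Int × List Int) i =>
      if PySem.List.pyGetD Guess i 0 == PySem.List.pyGetD SecretCode i 0 then
        (st.1 + 1, st.2.1, st.2.2)
      else
        (st.1, st.2.1 ++ [PySem.List.pyGetD SecretCode i 0], st.2.2 ++ [PySem.List.pyGetD Guess i 0]))
    (0, [], [])
  let secretCounts := st.2.1.foldl (fun (d : PySem.Dict Int Int) c => d.insert c (d.getD c 0 + 1)) PySem.Dict.empty
  let guessCounts := st.2.2.foldl (fun (d : PySem.Dict Int Int) c => d.insert c (d.getD c 0 + 1)) PySem.Dict.empty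
  let whitePins := (guessCounts.items.map (fun p => min p.2 (secretCounts.getD p.1 0))).sum
  (st.1, whitePins)

-- ===== PRECONDITION & SPEC =====
-- Pre_ excludes exactly the inputs where A raises IndexError: either list shorter than 4.
def Pre_PCFeedback (SecretCode : List Int) (Guess : List Int) : Prop :=
  4 ≤ SecretCode.length ∧ 4 ≤ Guess.length
instance (SecretCode : List Int) (Guess : List Int) : Decidable (Pre_PCFeedback SecretCode Guess) := by unfold Pre_PCFeedback; infer_instance
def pvWitness_PCFeedback : List Int × List Int := ([1, 2, 3, 4], [1, 3, 3, 2])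

def Spec_PCFeedback (SecretCode : List Int) (Guess : List Int) (out : Int × Int) : Prop := out = PCFeedback_alt SecretCode Guess
instance (SecretCode : List Int) (Guess : List Int) (out : Int × Int) : Decidable (Spec_PCFeedback SecretCode Guess out) := by unfold Spec_PCFeedback; infer_instance

-- ===== CLAIM (what is proved, stated in full; the proofs are below) =====
def Claim_equal_PCFeedback : Prop := ∀ (SecretCode : List Int) (Guess : List Int), Dom_PCFeedback SecretCode Guess → Pre_PCFeedback SecretCode Guess → Spec_PCFeedback SecretCode Guess (PCFeedback SecretCode Guess)

-- ===== LEMMAS AND PROOFS =====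

lemma pyInnerRemove_eq (i : Int) (s : List Int) :
    pyInnerRemove i s = if i ∈ s then (s.erase i, 1) else (s, 0) := by
  induction s with
  | nil => simp [pyInnerRemove]
  | cons j rest ih =>
    by_cases h : i = j
    · subst h; simp [pyInnerRemove]
    · simp [pyInnerRemove, ih, List.mem_cons, h, Ne.symm h, beq_iff_eq]
      split_ifs <;> simp

lemma greedy_white (g : List Int) : ∀ (s : List Int) (w : Int),
    (g.foldl (fun (p : List Int × Int) i =>
        let q := pyInnerRemove i p.1
        (q.1, p.2 + q.2)) (s, w)).2
      = w + (Multiset.card ((↑g : Multiset Int) ∩ ↑s) : Int) := by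
  induction g with
  | nil => intro s w; simp
  | cons i rest ih =>
    intro s w
    by_cases h : i ∈ s
    · have hm : i ∈ (↑s : Multiset Int) := by simpa using h
      have hstep : (let q := pyInnerRemove i (s, w).1
            ((q.1, (s, w).2 + q.2) : List Int × Int)) = (s.erase i, w + 1) := by
        simp [pyInnerRemove_eq, h]
      rw [List.foldl_cons, hstep, ih,
          show ((↑(i :: rest) : Multiset Int)) = i ::ₘ ↑rest from rfl,
          Multiset.cons_inter_of_pos _ hm,
          show ((↑(s.erase i) : Multiset Int)) = (↑s : Multiset Int).erase i by
            simp [Multiset.coe_erase]]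
      rw [Multiset.card_cons]
      push_cast
      ring
    · have hm : i ∉ (↑s : Multiset Int) := by simpa using h
      have hstep : (let q := pyInnerRemove i (s, w).1
            ((q.1, (s, w).2 + q.2) : List Int × Int)) = (s, w + 0) := by
        simp [pyInnerRemove_eq, h]
      rw [List.foldl_cons, hstep, ih,
          show ((↑(i :: rest) : Multiset Int)) = i ::ₘ ↑rest from rfl,
          Multiset.cons_inter_of_neg _ hm]
      ring

lemma card_eq_sum_over_support (m : Multiset Int) (L : List Int) (hnd : L.Nodup)
    (hsub : ∀ a, a ∈ m → a ∈ L) :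
    Multiset.card m = ((L.map (fun a => m.count a)).sum) := by
  have h1 : Multiset.card m = ∑ a ∈ m.toFinset, m.count a :=
    (Multiset.toFinset_sum_count_eq m).symm
  have h2 : ∑ a ∈ m.toFinset, m.count a = ∑ a ∈ L.toFinset, m.count a := by
    apply Finset.sum_subset
    · intro a ha
      simp only [Multiset.mem_toFinset] at ha
      simpa using hsub a ha
    · intro a _ ha
      simp only [Multiset.mem_toFinset] at ha
      exact Multiset.count_eq_zero.mpr ha
  rw [h1, h2, List.sum_toFinset _ hnd]

lemma counter_white (g s : List Int) :
    (((g.foldl (fun (d : PySem.Dict Int Int) c => d.insert c (d.getD c 0 + 1)) PySem.Dict.empty).items).map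
        (fun p => min p.2 ((s.foldl (fun (d : PySem.Dict Int Int) c => d.insert c (d.getD c 0 + 1)) PySem.Dict.empty).getD p.1 0))).sum
      = (Multiset.card ((↑g : Multiset Int) ∩ ↑s) : Int) := by
  rw [PySem.Dict.foldl_insert_getD_add_one_eq_counter,
      PySem.Dict.foldl_insert_getD_add_one_eq_counter,
      PySem.Dict.items_counter]
  have hsum : ∀ L : List Int,
      ((L.map (fun k => (k, (g.count k : Int)))).map
          (fun p => min p.2 ((PySem.Dict.counter s).getD p.1 0))).sum
        = ((L.map (fun k => ((min (g.count k) (s.count k) : Nat) : Int))).sum) := by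
    intro L
    rw [List.map_map]
    congr 1
    apply List.map_congr_left
    intro k _
    simp [PySem.Dict.getD_counter, Nat.cast_min]
  rw [hsum]
  have hcard := card_eq_sum_over_support ((↑g : Multiset Int) ∩ ↑s)
      (PySem.Set.ofList g) (PySem.Set.nodup_ofList g)
      (by
        intro a ha
        have : a ∈ (↑g : Multiset Int) := Multiset.mem_of_le Multiset.inter_le_left ha
        rw [PySem.Set.mem_ofList]
        simpa using this)
  have hcnt : ∀ a : Int, ((↑g : Multiset Int) ∩ ↑s).count a = min (g.count a) (s.count a) := by
    intro a
    rw [Multiset.count_inter]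
    simp
  rw [hcard]
  have : ((PySem.Set.ofList g).map (fun a => ((↑g : Multiset Int) ∩ ↑s).count a))
       = ((PySem.Set.ofList g).map (fun a => min (g.count a) (s.count a))) := by
    apply List.map_congr_left; intro a _; exact hcnt a
  rw [this]
  rw [Nat.cast_list_sum, List.map_map]
  congr 1

-- ===== VERDICT (by name: the statement is the Claim_ definition above) =====
theorem PCFeedback_spec : Claim_equal_PCFeedback := by
  intro SecretCode Guess _ _
  unfold Spec_PCFeedback PCFeedback PCFeedback_alt
  simp only []
  rw [greedy_white, counter_white]
  simp
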